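-- pv_equiv track=rewrite | github.com/sb-ncbr/overprot | OverProtCore/overprot/libs/lib_acyclic_clustering.py | local_edges_from_global_edges
-- ===== SOURCE A (Python) =====
-- from typing import Tuple, List, Dict, Optional, Sequence, Mapping, Collection, overload
--
-- Edge = Tuple  # Tuple[int, int, Any, ...]
--
-- def local_edges_from_global_edges(global_edges: Collection[Edge], offsets: list[int]) -> list[list[Edge]]:
--     n = len(offsets) - 1
--     local_edges: list[list[Edge]] = [[] for i in range(n)]
--     i_structure = 0
--     for u, v, orientation in sorted(global_edges):
--         while u >= offsets[i_structure+1]: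
--             i_structure += 1
--         fro = offsets[i_structure]
--         to = offsets[i_structure+1]
--         assert fro <= u < to
--         assert fro <= v < to
--         local_edges[i_structure].append((u - fro, v - fro, orientation))
--     return local_edges
-- ===== SOURCE B (Python) =====
-- def local_edges_from_global_edges(global_edges, offsets):
--     # One pass over the edges in their ORIGINAL order: each edge's structure is
--     # found by binary search on offsets, then every bucket is sorted; because the
--     # offset of a bucket is constant, this reproduces the globally-sorted order.
--     n = len(offsets) - 1
--     local_edges = [[] for _ in range(n)]
--     for u, v, orientation in global_edges:
--         i = _bisect_right(offsets, u) - 1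
--         fro = offsets[i]
--         to = offsets[i + 1]
--         assert fro <= u < to
--         assert fro <= v < to
--         local_edges[i].append((u - fro, v - fro, orientation))
--     for bucket in local_edges:
--         bucket.sort()
--     return local_edges
--
-- def _bisect_right(a, x):
--     lo, hi = 0, len(a)
--     while lo < hi:
--         mid = (lo + hi) // 2
--         if x < a[mid]:
--             hi = mid
--         else:
--             lo = mid + 1
--     return lo
-- ===== Notes on version B (the rewrite author's own statement) =====
-- stated objective: alternative
-- what changed: Instead of globally sorting the edges and sweeping a monotone structure pointer, B processes edges in their original order, locates each edge's structure by binary search on offsets, and sorts each per-structure bucket afterwards (the constant per-bucket offset makes this reproduce the globally-sorted order).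
-- outside the precondition, e.g. on local_edges_from_global_edges([(1, 1, 0)], [0, 3, 0, 3]): A returns [[(1, 1, 0)], [], []], B returns [[], [], [(1, 1, 0)]]
import Mathlib
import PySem

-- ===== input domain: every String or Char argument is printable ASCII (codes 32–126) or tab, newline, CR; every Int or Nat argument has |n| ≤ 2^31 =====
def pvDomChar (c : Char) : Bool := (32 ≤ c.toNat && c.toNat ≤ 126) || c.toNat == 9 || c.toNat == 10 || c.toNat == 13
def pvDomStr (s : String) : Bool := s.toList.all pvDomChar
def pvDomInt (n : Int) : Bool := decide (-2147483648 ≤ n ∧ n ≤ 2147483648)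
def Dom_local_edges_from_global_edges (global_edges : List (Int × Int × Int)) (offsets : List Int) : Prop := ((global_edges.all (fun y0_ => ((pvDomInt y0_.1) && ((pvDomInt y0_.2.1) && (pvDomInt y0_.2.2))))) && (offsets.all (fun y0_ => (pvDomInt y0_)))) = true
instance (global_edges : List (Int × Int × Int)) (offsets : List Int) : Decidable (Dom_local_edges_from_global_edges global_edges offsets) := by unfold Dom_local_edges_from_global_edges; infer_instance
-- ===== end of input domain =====

-- B distributes the edges in their ORIGINAL order via binary search on offsets and sorts each
-- bucket afterwards, instead of A's global sort + monotone structure pointer; same return value.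

-- Python compares int-triples lexicographically; this key into the Lex order is that comparison (exact).
def pvKey (t : Int × Int × Int) : Lex (Int × Lex (Int × Int)) := toLex (t.1, toLex (t.2.1, t.2.2))

-- ===== PORT A =====
-- 'while u >= offsets[i_structure+1]: i_structure += 1'; fuel = len(offsets) bounds the walk
-- (under Pre_ the loop always stops earlier; where Python would raise IndexError, Pre_ excludes the input).
def pvAdvance (offsets : List Int) (u : Int) : Int → Nat → Int
  | i, 0 => i
  | i, fuel+1 =>
    if PySem.List.pyGetD offsets (i+1) 0 ≤ u then pvAdvance offsets u (i+1) fuel else i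

def local_edges_from_global_edges (global_edges : List (Int × Int × Int)) (offsets : List Int) : List (List (Int × Int × Int)) :=
  let n : Int := PySem.List.len offsets - 1
  let init : List (List (Int × Int × Int)) := (PySem.List.pyRange 0 n).map (fun _ => [])
  ((PySem.List.sorted global_edges pvKey).foldl
    (fun (st : Int × List (List (Int × Int × Int))) e =>
      let i := pvAdvance offsets e.1 st.1 offsets.length
      let fro := PySem.List.pyGetD offsets i 0
      -- asserts 'fro <= u < to' / 'fro <= v < to' hold under Pre_ (AssertionError is excluded by Pre_)
      (i, PySem.List.pySetD st.2 i
            (PySem.List.pyGetD st.2 i [] ++ [(e.1 - fro, e.2.1 - fro, e.2.2)])))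
    (0, init)).2

-- ===== PORT B =====
-- Source B's hand-written bisect_right, step for step (exact on every input Pre_ admits)
def pvBisectRight (a : List Int) (x : Int) (lo hi : Int) : Int :=
  if h : lo < hi then
    if x < PySem.List.pyGetD a (PySem.Int.floordiv (lo + hi) 2) 0 then
      pvBisectRight a x lo (PySem.Int.floordiv (lo + hi) 2)
    else
      pvBisectRight a x (PySem.Int.floordiv (lo + hi) 2 + 1) hi
  else lo
termination_by (hi - lo).toNat
decreasing_by
  · have h2 : PySem.Int.floordiv (lo + hi) 2 < hi := by
      rw [PySem.Int.floordiv_lt_iff_lt_mul (by omega)]; omega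
    omega
  · have h1 := PySem.Int.floordiv_two_mid_bounds (le_of_lt h)
    have h2 : PySem.Int.floordiv (lo + hi) 2 < hi := by
      rw [PySem.Int.floordiv_lt_iff_lt_mul (by omega)]; omega
    omega

def local_edges_from_global_edges_alt (global_edges : List (Int × Int × Int)) (offsets : List Int) : List (List (Int × Int × Int)) :=
  let n : Int := PySem.List.len offsets - 1
  let init : List (List (Int × Int × Int)) := (PySem.List.pyRange 0 n).map (fun _ => [])
  let buckets := global_edges.foldl
    (fun bk (e : Int × Int × Int) =>
      let i : Int := pvBisectRight offsets e.1 0 (PySem.List.len offsets) - 1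
      let fro := PySem.List.pyGetD offsets i 0
      -- asserts 'fro <= u < to' / 'fro <= v < to' hold under Pre_
      PySem.List.pySetD bk i
        (PySem.List.pyGetD bk i [] ++ [(e.1 - fro, e.2.1 - fro, e.2.2)]))
    init
  buckets.map (fun b => PySem.List.sorted b pvKey)

-- ===== PRECONDITION & SPEC =====
-- Pre_ excludes (a) unsorted offsets when at least one edge is present — A can still return there,
-- but its monotone-pointer bucketing is an accident of processing order and no caller passes them
-- (offsets are cumulative lengths) — and (b) any edge whose endpoints do not both lie in one
-- structure's [fro, to) window, on which A raises AssertionError or IndexError.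
def Pre_local_edges_from_global_edges (global_edges : List (Int × Int × Int)) (offsets : List Int) : Prop :=
  (global_edges = [] ∨ offsets.Pairwise (· ≤ ·)) ∧
  ∀ e ∈ global_edges, ∃ i < offsets.length, i + 1 < offsets.length ∧
    offsets.getD i 0 ≤ e.1 ∧ e.1 < offsets.getD (i+1) 0 ∧
    offsets.getD i 0 ≤ e.2.1 ∧ e.2.1 < offsets.getD (i+1) 0

instance (global_edges : List (Int × Int × Int)) (offsets : List Int) : Decidable (Pre_local_edges_from_global_edges global_edges offsets) := by
  unfold Pre_local_edges_from_global_edges; infer_instance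

def pvWitness_local_edges_from_global_edges : (List (Int × Int × Int)) × List Int :=
  ([(0, 1, 5), (3, 4, -1), (1, 0, 2)], [0, 3, 5])

def Spec_local_edges_from_global_edges (global_edges : List (Int × Int × Int)) (offsets : List Int) (out : List (List (Int × Int × Int))) : Prop := out = local_edges_from_global_edges_alt global_edges offsets
instance (global_edges : List (Int × Int × Int)) (offsets : List Int) (out : List (List (Int × Int × Int))) : Decidable (Spec_local_edges_from_global_edges global_edges offsets out) := by unfold Spec_local_edges_from_global_edges; infer_instance

-- ===== CLAIM (what is proved, stated in full; the proofs are below) =====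
def Claim_equal_local_edges_from_global_edges : Prop := ∀ (global_edges : List (Int × Int × Int)) (offsets : List Int), Dom_local_edges_from_global_edges global_edges offsets → Pre_local_edges_from_global_edges global_edges offsets → Spec_local_edges_from_global_edges global_edges offsets (local_edges_from_global_edges global_edges offsets)

-- ===== LEMMAS AND PROOFS =====

-- proof-side notions: the owner bucket of a coordinate
def pvOwned (offsets : List Int) (u : Int) : Prop :=
  ∃ j : Nat, j + 1 < offsets.length ∧ offsets.getD j 0 ≤ u ∧ u < offsets.getD (j+1) 0

def pvOwn (offsets : List Int) (u : Int) : Nat :=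
  (pvBisectRight offsets u 0 (PySem.List.len offsets) - 1).toNat

-- the canonical per-edge bucket update both ports reduce to
def pvStep (offsets : List Int) (bk : List (List (Int × Int × Int))) (e : Int × Int × Int) : List (List (Int × Int × Int)) :=
  let k := pvOwn offsets e.1
  bk.set k (bk.getD k [] ++ [(e.1 - offsets.getD k 0, e.2.1 - offsets.getD k 0, e.2.2)])

def pvShift (offsets : List Int) (k : Nat) (e : Int × Int × Int) : Int × Int × Int :=
  (e.1 - offsets.getD k 0, e.2.1 - offsets.getD k 0, e.2.2)

lemma pvKey_inj : Function.Injective pvKey := by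
  intro a b h
  simp only [pvKey] at h
  have h1 := toLex.injective h
  have h2 := toLex.injective (congrArg Prod.snd h1)
  have := congrArg Prod.fst h1
  exact Prod.ext this (Prod.ext (congrArg Prod.fst h2) (congrArg Prod.snd h2))

lemma pvKey_le_iff (a b : Int × Int × Int) :
    pvKey a ≤ pvKey b ↔ (a.1 < b.1 ∨ (a.1 = b.1 ∧ (a.2.1 < b.2.1 ∨ (a.2.1 = b.2.1 ∧ a.2.2 ≤ b.2.2)))) := by
  simp [pvKey, Prod.Lex.toLex_le_toLex]

lemma pvKey_shift (offsets : List Int) (k : Nat) (a b : Int × Int × Int)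
    (h : pvKey a ≤ pvKey b) : pvKey (pvShift offsets k a) ≤ pvKey (pvShift offsets k b) := by
  rw [pvKey_le_iff] at h ⊢
  simp only [pvShift]
  omega

lemma pvKey_le_fst {a b : Int × Int × Int} (h : pvKey a ≤ pvKey b) : a.1 ≤ b.1 := by
  rw [pvKey_le_iff] at h; omega

lemma sorted_getD (a : List Int) (hs : a.Pairwise (· ≤ ·)) (i j : Nat)
    (hij : i ≤ j) (hj : j < a.length) : a.getD i 0 ≤ a.getD j 0 := by
  rcases Nat.lt_or_ge i j with h | h
  · rw [List.getD_eq_getElem a 0 (by omega), List.getD_eq_getElem a 0 hj]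
    exact (List.pairwise_iff_getElem.mp hs) i j (by omega) hj h
  · have : i = j := by omega
    subst this; exact le_refl _

lemma pvBisect_spec (a : List Int) (x : Int) (hs : a.Pairwise (· ≤ ·)) :
    ∀ (lo hi : Int), 0 ≤ lo → lo ≤ hi → hi ≤ (a.length : Int) →
    (∀ j : Nat, (j : Int) < lo → a.getD j 0 ≤ x) →
    (∀ j : Nat, hi ≤ (j : Int) → j < a.length → x < a.getD j 0) →
    lo ≤ pvBisectRight a x lo hi ∧ pvBisectRight a x lo hi ≤ hi ∧
    (∀ j : Nat, (j : Int) < pvBisectRight a x lo hi → a.getD j 0 ≤ x) ∧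
    (∀ j : Nat, pvBisectRight a x lo hi ≤ (j : Int) → j < a.length → x < a.getD j 0) := by
  intro lo hi
  generalize hm : (hi - lo).toNat = m
  induction m using Nat.strong_induction_on generalizing lo hi with
  | _ m ih =>
    intro h0 hlh hhl hlo hhi
    rw [pvBisectRight]
    split
    · rename_i h
      have hb := PySem.Int.floordiv_two_mid_bounds (le_of_lt h)
      have hmlt : PySem.Int.floordiv (lo + hi) 2 < hi := by
        rw [PySem.Int.floordiv_lt_iff_lt_mul (by omega)]; omega
      have hget : PySem.List.pyGetD a (PySem.Int.floordiv (lo + hi) 2) 0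
          = a.getD (PySem.Int.floordiv (lo + hi) 2).toNat 0 := by
        rw [PySem.List.pyGetD_eq_getElem a 0 (by omega) (by omega),
            List.getD_eq_getElem a 0 (by omega)]
      split
      · rename_i hcond
        rw [hget] at hcond
        have hrec := ih ((PySem.Int.floordiv (lo + hi) 2 - lo).toNat) (by omega)
          lo (PySem.Int.floordiv (lo + hi) 2) rfl h0 (by omega) (by omega) hlo
          (by
            intro j hj1 hj2
            have hmj : (PySem.Int.floordiv (lo + hi) 2).toNat ≤ j := by omega
            exact lt_of_lt_of_le hcond (sorted_getD a hs _ j hmj hj2))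
        exact ⟨hrec.1, hrec.2.1.trans (le_of_lt hmlt), hrec.2.2⟩
      · rename_i hcond
        rw [hget] at hcond
        replace hcond := not_lt.mp hcond
        have hrec := ih ((hi - (PySem.Int.floordiv (lo + hi) 2 + 1)).toNat) (by omega)
          (PySem.Int.floordiv (lo + hi) 2 + 1) hi rfl (by omega) (by omega) hhl
          (by
            intro j hj1
            have hjm : j ≤ (PySem.Int.floordiv (lo + hi) 2).toNat := by omega
            exact le_trans (sorted_getD a hs j _ hjm (by omega)) hcond)
          hhi
        exact ⟨le_trans (by omega) hrec.1, hrec.2.1, hrec.2.2⟩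
    · rename_i h
      refine ⟨le_refl lo, hlh, hlo, ?_⟩
      intro j hj1 hj2
      exact hhi j (by omega) hj2

lemma pvBisect_eq (offsets : List Int) (u : Int) (hs : offsets.Pairwise (· ≤ ·))
    (j : Nat) (hj1 : j + 1 < offsets.length)
    (h2 : offsets.getD j 0 ≤ u) (h3 : u < offsets.getD (j+1) 0) :
    pvBisectRight offsets u 0 (PySem.List.len offsets) = (j : Int) + 1 := by
  have hlen : PySem.List.len offsets = (offsets.length : Int) := by
    simp [PySem.List.len_eq]
  have hspec := pvBisect_spec offsets u hs 0 (PySem.List.len offsets)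
    (le_refl 0) (by omega) (by omega)
    (by intro k hk; omega)
    (by intro k hk1 hk2; rw [hlen] at hk1; omega)
  obtain ⟨p1, p2, p3, p4⟩ := hspec
  by_contra hne
  rcases lt_or_gt_of_ne hne with hlt | hgt
  · have hr : pvBisectRight offsets u 0 (PySem.List.len offsets) ≤ (j : Int) := by omega
    exact absurd (p4 j hr (by omega)) (not_lt.mpr h2)
  · have hr : ((j+1 : Nat) : Int) < pvBisectRight offsets u 0 (PySem.List.len offsets) := by
      push_cast; omega
    exact absurd (p3 (j+1) hr) (not_le.mpr h3)

lemma pvOwn_eq (offsets : List Int) (u : Int) (hs : offsets.Pairwise (· ≤ ·))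
    (j : Nat) (hj1 : j + 1 < offsets.length)
    (h2 : offsets.getD j 0 ≤ u) (h3 : u < offsets.getD (j+1) 0) :
    pvOwn offsets u = j := by
  unfold pvOwn
  rw [pvBisect_eq offsets u hs j hj1 h2 h3]
  omega

lemma pvOwn_spec (offsets : List Int) (u : Int) (hs : offsets.Pairwise (· ≤ ·))
    (h : pvOwned offsets u) :
    pvOwn offsets u + 1 < offsets.length ∧
    offsets.getD (pvOwn offsets u) 0 ≤ u ∧ u < offsets.getD (pvOwn offsets u + 1) 0 := by
  obtain ⟨j, hj1, h2, h3⟩ := h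
  rw [pvOwn_eq offsets u hs j hj1 h2 h3]
  exact ⟨hj1, h2, h3⟩

lemma pvOwn_mono (offsets : List Int) (hs : offsets.Pairwise (· ≤ ·))
    {u u' : Int} (h : u ≤ u') (hu : pvOwned offsets u) (hu' : pvOwned offsets u') :
    pvOwn offsets u ≤ pvOwn offsets u' := by
  obtain ⟨ha1, ha2, ha3⟩ := pvOwn_spec offsets u hs hu
  obtain ⟨hb1, hb2, hb3⟩ := pvOwn_spec offsets u' hs hu'
  by_contra hlt
  have hle : pvOwn offsets u' + 1 ≤ pvOwn offsets u := by omega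
  have hmono := sorted_getD offsets hs (pvOwn offsets u' + 1) (pvOwn offsets u) hle (by omega)
  exact lt_irrefl u' (lt_of_lt_of_le hb3 (hmono.trans (ha2.trans h)))

lemma pvAdvance_eq (offsets : List Int) (u : Int) (hs : offsets.Pairwise (· ≤ ·))
    (j : Nat) (hj1 : j + 1 < offsets.length)
    (h2 : offsets.getD j 0 ≤ u) (h3 : u < offsets.getD (j+1) 0) :
    ∀ (fuel : Nat) (i : Int), 0 ≤ i → i ≤ (j : Int) → (j : Int) - i < (fuel : Int) →
    pvAdvance offsets u i fuel = (j : Int) := by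
  intro fuel
  induction fuel with
  | zero => intro i _ hij hf; exfalso; omega
  | succ fuel ih =>
    intro i hi0 hij hf
    rcases eq_or_lt_of_le hij with heq | hlt
    · subst heq
      have hget : PySem.List.pyGetD offsets ((j : Int) + 1) 0 = offsets.getD (j+1) 0 := by
        have : ((j : Int) + 1) = ((j + 1 : Nat) : Int) := by push_cast; ring
        rw [this, PySem.List.pyGetD_natCast]
      simp only [pvAdvance, hget]
      rw [if_neg (not_le.mpr h3)]
    · have hcond : PySem.List.pyGetD offsets (i + 1) 0 ≤ u := by
        have h1 : (0:Int) ≤ i + 1 := by omega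
        have h2' : i + 1 < (offsets.length : Int) := by omega
        rw [PySem.List.pyGetD_eq_getElem offsets 0 h1 h2',
            ← List.getD_eq_getElem offsets 0 (by omega)]
        exact le_trans (sorted_getD offsets hs (i+1).toNat j (by omega) (by omega)) h2
      simp only [pvAdvance]
      rw [if_pos hcond]
      exact ih (i + 1) (by omega) (by omega) (by omega)

lemma foldl_pvStep_length (offsets : List Int) (es : List (Int × Int × Int)) :
    ∀ bk, (es.foldl (pvStep offsets) bk).length = bk.length := by
  induction es with
  | nil => intro bk; rfl
  | cons e t ih => intro bk; rw [List.foldl_cons, ih]; simp [pvStep]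

lemma foldl_pvStep_getD (offsets : List Int) (es : List (Int × Int × Int)) :
    ∀ bk, (∀ e ∈ es, pvOwn offsets e.1 < bk.length) → ∀ k : Nat,
    (es.foldl (pvStep offsets) bk).getD k [] =
      bk.getD k [] ++ (es.filter (fun e => pvOwn offsets e.1 == k)).map (pvShift offsets k) := by
  induction es with
  | nil => intro bk _ k; simp
  | cons e t ih =>
    intro bk hmem k
    have hlen : (pvStep offsets bk e).length = bk.length := by simp [pvStep]
    have hown : pvOwn offsets e.1 < bk.length := hmem e (List.mem_cons_self)
    rw [List.foldl_cons, ih (pvStep offsets bk e) (by intro e' he'; rw [hlen]; exact hmem e' (List.mem_cons_of_mem e he')) k]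
    by_cases hk : pvOwn offsets e.1 = k
    · subst hk
      have hget : (pvStep offsets bk e).getD (pvOwn offsets e.1) []
          = bk.getD (pvOwn offsets e.1) [] ++ [pvShift offsets (pvOwn offsets e.1) e] := by
        simp [pvStep, pvShift, List.getD_eq_getElem?_getD, hown]
      rw [hget, List.filter_cons_of_pos (by simp), List.map_cons, List.append_assoc,
          List.singleton_append]
    · have hget : (pvStep offsets bk e).getD k [] = bk.getD k [] := by
        simp [pvStep, List.getD_eq_getElem?_getD, hk]
      rw [hget, List.filter_cons_of_neg (by simp [hk])]

-- A's stateful fold over the sorted list is the canonical fold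
lemma A_fold_eq (offsets : List Int) (hs : offsets.Pairwise (· ≤ ·)) :
    ∀ (s : List (Int × Int × Int)),
    s.Pairwise (fun a b => pvKey a ≤ pvKey b) →
    (∀ e ∈ s, pvOwned offsets e.1 ) →
    ∀ (i0 : Int) (bk : List (List (Int × Int × Int))), 0 ≤ i0 →
    (∀ e ∈ s, i0 ≤ (pvOwn offsets e.1 : Int)) →
    (s.foldl
      (fun (st : Int × List (List (Int × Int × Int))) e =>
        let i := pvAdvance offsets e.1 st.1 offsets.length
        let fro := PySem.List.pyGetD offsets i 0
        (i, PySem.List.pySetD st.2 i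
              (PySem.List.pyGetD st.2 i [] ++ [(e.1 - fro, e.2.1 - fro, e.2.2)])))
      (i0, bk)).2 = s.foldl (pvStep offsets) bk := by
  intro s
  induction s with
  | nil => intro _ _ i0 bk _ _; rfl
  | cons e t ih =>
    intro hsorted howned i0 bk hi0 hle
    obtain ⟨hhead, htail⟩ := List.pairwise_cons.mp hsorted
    obtain ⟨j, hj1, h2, h3⟩ := howned e (List.mem_cons_self)
    have hown : pvOwn offsets e.1 = j := pvOwn_eq offsets e.1 hs j hj1 h2 h3
    have hadv : pvAdvance offsets e.1 i0 offsets.length = ((j : Nat) : Int) := by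
      apply pvAdvance_eq offsets e.1 hs j hj1 h2 h3 offsets.length i0 hi0
      · have := hle e (List.mem_cons_self); omega
      · omega
    rw [List.foldl_cons, List.foldl_cons]
    simp only [hadv, PySem.List.pySetD_natCast, PySem.List.pyGetD_natCast]
    have hstep : bk.set j (bk.getD j [] ++
        [(e.1 - offsets.getD j 0, e.2.1 - offsets.getD j 0, e.2.2)]) = pvStep offsets bk e := by
      simp [pvStep, hown]
    rw [hstep]
    apply ih htail (fun e' he' => howned e' (List.mem_cons_of_mem e he')) ((j : Nat) : Int)
      (pvStep offsets bk e) (by omega)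
    intro e' he'
    have hkey := hhead e' he'
    have hmono := pvOwn_mono offsets hs (pvKey_le_fst hkey) ⟨j, hj1, h2, h3⟩
      (howned e' (List.mem_cons_of_mem e he'))
    omega

-- B's fold is the canonical fold
lemma B_fold_eq (offsets : List Int) (hs : offsets.Pairwise (· ≤ ·))
    (ge : List (Int × Int × Int)) (hpre : ∀ e ∈ ge, pvOwned offsets e.1)
    (bk : List (List (Int × Int × Int))) :
    ge.foldl
      (fun bk (e : Int × Int × Int) =>
        let i : Int := pvBisectRight offsets e.1 0 (PySem.List.len offsets) - 1
        let fro := PySem.List.pyGetD offsets i 0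
        PySem.List.pySetD bk i
          (PySem.List.pyGetD bk i [] ++ [(e.1 - fro, e.2.1 - fro, e.2.2)]))
      bk = ge.foldl (pvStep offsets) bk := by
  apply PySem.List.foldl_congr_mem
  intro acc e he
  obtain ⟨j, hj1, h2, h3⟩ := hpre e he
  have hb := pvBisect_eq offsets e.1 hs j hj1 h2 h3
  have hcast : pvBisectRight offsets e.1 0 (PySem.List.len offsets) - 1 = ((j : Nat) : Int) := by
    rw [hb]; ring
  simp only [hcast, PySem.List.pySetD_natCast, PySem.List.pyGetD_natCast, pvStep,
    pvOwn_eq offsets e.1 hs j hj1 h2 h3]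

-- per-bucket: distributing the sorted list equals sorting the distributed bucket
lemma bucket_sorted (offsets : List Int)
    (ge : List (Int × Int × Int)) (k : Nat) :
    ((PySem.List.sorted ge pvKey).filter (fun e => pvOwn offsets e.1 == k)).map (pvShift offsets k)
    = PySem.List.sorted ((ge.filter (fun e => pvOwn offsets e.1 == k)).map (pvShift offsets k)) pvKey := by
  have hperm1 := ((PySem.List.sorted_perm ge pvKey false).filter
      (fun e => pvOwn offsets e.1 == k)).map (pvShift offsets k)
  have hperm2 := PySem.List.sorted_perm
      ((ge.filter (fun e => pvOwn offsets e.1 == k)).map (pvShift offsets k)) pvKey false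
  have hpair1 : (((PySem.List.sorted ge pvKey).filter
      (fun e => pvOwn offsets e.1 == k)).map (pvShift offsets k)).Pairwise
      (fun a b => pvKey a ≤ pvKey b) := by
    exact (List.Pairwise.sublist List.filter_sublist
      (PySem.List.sorted_pairwise ge pvKey)).map (pvShift offsets k)
      (fun a b hab => pvKey_shift offsets k a b hab)
  have hpair2 := PySem.List.sorted_pairwise
      ((ge.filter (fun e => pvOwn offsets e.1 == k)).map (pvShift offsets k)) pvKey
  exact PySem.List.eq_of_perm_of_pairwise_le_of_injective pvKey pvKey_inj
    (hperm1.trans hperm2.symm) hpair1 hpair2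

-- ===== VERDICT (by name: the statement is the Claim_ definition above) =====
theorem local_edges_from_global_edges_spec : Claim_equal_local_edges_from_global_edges := by
  intro ge offsets _hdom hpre
  unfold Spec_local_edges_from_global_edges
  obtain ⟨hcase, hex⟩ := hpre
  rcases hcase with hnil | hs
  · subst hnil
    show ((PySem.List.pyRange 0 (PySem.List.len offsets - 1)).map
        (fun _ => ([] : List (Int × Int × Int))))
      = ((PySem.List.pyRange 0 (PySem.List.len offsets - 1)).map
        (fun _ => ([] : List (Int × Int × Int)))).map (fun b => PySem.List.sorted b pvKey)
    rw [List.map_map]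
    rfl
  have howned : ∀ e ∈ ge, pvOwned offsets e.1 := by
    intro e he
    obtain ⟨i, _, hi1, ha, hb, _, _⟩ := hex e he
    exact ⟨i, hi1, ha, hb⟩
  have hownedS : ∀ e ∈ PySem.List.sorted ge pvKey, pvOwned offsets e.1 := by
    intro e he
    exact howned e ((PySem.List.mem_sorted ge pvKey false e).mp he)
  have hinitlen : ((PySem.List.pyRange 0 (PySem.List.len offsets - 1)).map
      (fun _ => ([] : List (Int × Int × Int)))).length
      = ((offsets.length : Int) - 1).toNat := by
    simp [PySem.List.length_pyRange_one, PySem.List.len_eq]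
  have hownlt : ∀ e, pvOwned offsets e → pvOwn offsets e <
      ((PySem.List.pyRange 0 (PySem.List.len offsets - 1)).map
        (fun _ => ([] : List (Int × Int × Int)))).length := by
    intro e hown
    obtain ⟨j, hj1, ha, hb⟩ := hown
    rw [pvOwn_eq offsets e hs j hj1 ha hb, hinitlen]
    omega
  have hinitgetD : ∀ (l : List Int) (k : Nat),
      (l.map (fun _ => ([] : List (Int × Int × Int)))).getD k [] = [] := by
    intro l
    induction l with
    | nil => intro k; rfl
    | cons a t ih => intro k; cases k with | zero => rfl | succ k => exact ih k
  have hmain : (PySem.List.sorted ge pvKey).foldl (pvStep offsets)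
      ((PySem.List.pyRange 0 (PySem.List.len offsets - 1)).map
        (fun _ => ([] : List (Int × Int × Int))))
      = ((ge.foldl (pvStep offsets)
          ((PySem.List.pyRange 0 (PySem.List.len offsets - 1)).map
            (fun _ => ([] : List (Int × Int × Int))))).map
          (fun b => PySem.List.sorted b pvKey)) := by
    apply List.ext_getElem
    · simp [foldl_pvStep_length]
    · intro k hk1 hk2
      rw [← List.getD_eq_getElem _ [] hk1,
          foldl_pvStep_getD offsets _ _ (fun e he => hownlt e.1 (hownedS e he)) k,
          List.getElem_map,
          ← List.getD_eq_getElem _ [] (by simpa using hk2),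
          foldl_pvStep_getD offsets _ _ (fun e he => hownlt e.1 (howned e he)) k,
          hinitgetD _ k, List.nil_append, List.nil_append]
      exact bucket_sorted offsets ge k
  refine Eq.trans
    (A_fold_eq offsets hs _ (PySem.List.sorted_pairwise ge pvKey) hownedS 0 _ (le_refl 0)
      (fun e _ => Int.natCast_nonneg _))
    (Eq.trans hmain
      (congrArg (List.map (fun b => PySem.List.sorted b pvKey))
        (B_fold_eq offsets hs ge howned _)).symm)
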